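-- pv_equiv track=rewrite | github.com/pasrom/wastewater | tools/extract_virus_data.py | _calculate_week
-- ===== SOURCE A (Python) =====
-- def _calculate_week(kw: int, year: int) -> tuple[int, int]:
--     """Normalize week number, handling year rollover."""
--     while kw > 52:
--         kw -= 52
--         year += 1
--     while kw < 1:
--         kw += 52
--         year -= 1
--     return kw, year
-- ===== SOURCE B (Python) =====
-- def _calculate_week(kw: int, year: int) -> tuple[int, int]:
--     """Normalize week number, handling year rollover (closed form)."""
--     q, r = divmod(kw - 1, 52)
--     return r + 1, year + q
-- ===== Notes on version B (the rewrite author's own statement) =====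
-- stated objective: faster
-- what changed: Replaces the two while-loops that step by 52 with a single closed-form divmod(kw-1, 52), mapping overflow and underflow at once.
import Mathlib
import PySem

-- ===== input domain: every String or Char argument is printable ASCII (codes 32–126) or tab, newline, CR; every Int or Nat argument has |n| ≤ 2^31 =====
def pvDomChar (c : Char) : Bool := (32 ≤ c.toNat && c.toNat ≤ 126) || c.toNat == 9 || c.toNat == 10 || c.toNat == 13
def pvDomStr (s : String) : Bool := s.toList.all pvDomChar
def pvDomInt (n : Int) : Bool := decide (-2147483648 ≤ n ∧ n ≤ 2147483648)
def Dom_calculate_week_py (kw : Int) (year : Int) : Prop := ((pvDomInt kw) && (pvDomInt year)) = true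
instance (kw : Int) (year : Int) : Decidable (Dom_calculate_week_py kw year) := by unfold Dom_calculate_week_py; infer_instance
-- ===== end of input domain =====

-- B replaces A's two while-loops with a single closed-form divmod(kw-1, 52); objective: faster (O(1) vs O(|kw|)).


-- ===== PORT A =====
-- first while-loop: while kw > 52: kw -= 52; year += 1
def pvLoop1 (kw year : Int) : Int × Int :=
  if kw > 52 then pvLoop1 (kw - 52) (year + 1) else (kw, year)
termination_by (kw - 52).toNat
decreasing_by omega

-- second while-loop: while kw < 1: kw += 52; year -= 1
def pvLoop2 (kw year : Int) : Int × Int :=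
  if kw < 1 then pvLoop2 (kw + 52) (year - 1) else (kw, year)
termination_by (1 - kw).toNat
decreasing_by omega

def calculate_week_py (kw : Int) (year : Int) : Int × Int :=
  let p := pvLoop1 kw year
  pvLoop2 p.1 p.2

-- ===== PORT B =====
-- q, r = divmod(kw - 1, 52); return r + 1, year + q
def calculate_week_py_alt (kw : Int) (year : Int) : Int × Int :=
  let q := PySem.Int.floordiv (kw - 1) 52
  let r := PySem.Int.mod (kw - 1) 52
  (r + 1, year + q)

-- ===== PRECONDITION & SPEC =====
def Spec_calculate_week_py (kw : Int) (year : Int) (out : Int × Int) : Prop := out = calculate_week_py_alt kw year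
instance (kw : Int) (year : Int) (out : Int × Int) : Decidable (Spec_calculate_week_py kw year out) := by unfold Spec_calculate_week_py; infer_instance

-- ===== CLAIM (what is proved, stated in full; the proofs are below) =====
def Claim_equal_calculate_week_py : Prop := ∀ (kw : Int) (year : Int), Dom_calculate_week_py kw year → Spec_calculate_week_py kw year (calculate_week_py kw year)

-- ===== LEMMAS AND PROOFS =====


theorem fd52 (a : Int) : PySem.Int.floordiv a 52 = a / 52 :=
  PySem.Int.floordiv_eq_ediv_of_pos (by norm_num)
theorem md52 (a : Int) : PySem.Int.mod a 52 = a % 52 :=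
  PySem.Int.mod_eq_emod_of_pos (by norm_num)

-- the closed form is invariant under one step of either loop
theorem alt_step_down (kw year : Int) :
    calculate_week_py_alt (kw - 52) (year + 1) = calculate_week_py_alt kw year := by
  simp only [calculate_week_py_alt, fd52, md52, Prod.mk.injEq]
  constructor <;> omega

theorem alt_step_up (kw year : Int) :
    calculate_week_py_alt (kw + 52) (year - 1) = calculate_week_py_alt kw year := by
  simp only [calculate_week_py_alt, fd52, md52, Prod.mk.injEq]
  constructor <;> omega

theorem loop1_alt (kw year : Int) :
    calculate_week_py_alt (pvLoop1 kw year).1 (pvLoop1 kw year).2 = calculate_week_py_alt kw year ∧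
    (pvLoop1 kw year).1 ≤ 52 := by
  induction kw, year using pvLoop1.induct with
  | case1 kw year h ih =>
    rw [pvLoop1, if_pos h]
    exact ⟨ih.1.trans (by have := alt_step_down kw year; simpa using this), ih.2⟩
  | case2 kw year h =>
    rw [pvLoop1, if_neg h]
    exact ⟨rfl, by omega⟩

theorem loop2_alt (kw year : Int) :
    calculate_week_py_alt (pvLoop2 kw year).1 (pvLoop2 kw year).2 = calculate_week_py_alt kw year ∧
    1 ≤ (pvLoop2 kw year).1 ∧ (pvLoop2 kw year).1 ≤ max kw 52 := by
  induction kw, year using pvLoop2.induct with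
  | case1 kw year h ih =>
    rw [pvLoop2, if_pos h]
    refine ⟨ih.1.trans (by have := alt_step_up kw year; simpa using this), ih.2.1, ?_⟩
    have := ih.2.2
    omega
  | case2 kw year h =>
    rw [pvLoop2, if_neg h]
    exact ⟨rfl, by omega, by omega⟩

-- on 1 ≤ kw ≤ 52 the closed form is the identity
theorem alt_fixed (kw year : Int) (h1 : 1 ≤ kw) (h2 : kw ≤ 52) :
    calculate_week_py_alt kw year = (kw, year) := by
  simp only [calculate_week_py_alt, fd52, md52, Prod.mk.injEq]
  constructor <;> omega

-- ===== VERDICT (by name: the statement is the Claim_ definition above) =====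
theorem calculate_week_py_spec : Claim_equal_calculate_week_py := by
  intro kw year _
  unfold Spec_calculate_week_py calculate_week_py
  obtain ⟨h1eq, h1le⟩ := loop1_alt kw year
  obtain ⟨h2eq, h2lo, h2hi⟩ := loop2_alt (pvLoop1 kw year).1 (pvLoop1 kw year).2
  rw [← h1eq, ← h2eq]
  exact (alt_fixed _ _ h2lo (by omega)).symm
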